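-- pv_equiv track=rewrite | github.com/OlegSudakov/Programming-Problems | leetcode/isomorphic_strings.py | computePattern
-- ===== SOURCE A (Python) =====
-- def computePattern(word):
--     index = 0
--     seen = {}
--     pattern = []
--     for char in word:
--         if char in seen:
--             pattern.append(seen[char])
--         else:
--             seen[char] = index
--             pattern.append(seen[char])
--             index += 1
--     return pattern
-- ===== SOURCE B (Python) =====
-- def computePattern(word):
--     # rank of a character = number of distinct characters occurring strictly
--     # before its first occurrence; computed per distinct char by slicing,
--     # no sequential counter and no interleaved build/emit loop.
--     rank = {c: len(set(word[:word.index(c)])) for c in set(word)}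
--     return [rank[c] for c in word]
-- ===== Notes on version B (the rewrite author's own statement) =====
-- stated objective: alternative
-- what changed: B replaces A's online loop (counter incremented while interleaving dict insertion with appends) by a closed-form rank per distinct character -- len(set(word[:word.index(c)])), the number of distinct characters before c's first occurrence -- computed once per element of set(word), then a mapping pass; no running index, no insertion-order-built pattern.
import Mathlib
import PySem

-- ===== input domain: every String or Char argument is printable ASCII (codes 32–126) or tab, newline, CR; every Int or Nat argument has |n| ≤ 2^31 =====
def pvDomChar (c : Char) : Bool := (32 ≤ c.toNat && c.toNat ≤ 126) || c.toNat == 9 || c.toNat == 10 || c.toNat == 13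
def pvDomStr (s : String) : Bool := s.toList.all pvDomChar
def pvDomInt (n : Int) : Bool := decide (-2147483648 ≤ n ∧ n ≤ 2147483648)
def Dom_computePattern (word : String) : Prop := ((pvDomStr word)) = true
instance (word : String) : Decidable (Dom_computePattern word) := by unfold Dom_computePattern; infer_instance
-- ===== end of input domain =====

-- B drops A's online counter: the rank of each distinct character is computed in closed form
-- as the number of distinct characters before its first occurrence, then the word is mapped.

-- ===== PORT A =====
-- Source A's loop body: state (index, seen, pattern); append and insert interleaved
def pvStepA (st : Int × PySem.Dict Char Int × List Int) (c : Char) :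
    Int × PySem.Dict Char Int × List Int :=
  let index := st.1
  let seen := st.2.1
  let pattern := st.2.2
  if seen.contains c then
    -- pattern.append(seen[char]): key present, so getD with any default is exact
    (index, seen, pattern ++ [seen.getD c 0])
  else
    let seen' := seen.insert c index
    (index + 1, seen', pattern ++ [seen'.getD c 0])

def computePattern (word : String) : List Int :=
  (word.toList.foldl pvStepA (0, PySem.Dict.empty, [])).2.2

-- ===== PORT B =====
-- len(set(word[:word.index(c)])): c is a character of word here, so word.index(c) is some
-- nonnegative in-range index and the slice word[:i] is exactly 'take i'
def pvRankOf (cs : List Char) (c : Char) : Int :=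
  ((PySem.Set.ofList (cs.take ((PySem.List.index? cs c).getD 0))).length : Int)

-- {c: len(set(word[:word.index(c)])) for c in set(word)}: Python iterates set(word) in hash
-- order, but the dict is only looked up afterwards, so the result is order-independent and
-- the comprehension is ported as a fold over PySem.Set.ofList; rank[c] has c always a key,
-- so getD with any default is exact
def computePattern_alt (word : String) : List Int :=
  let cs := word.toList
  let rank := (PySem.Set.ofList cs).foldl (fun d c => d.insert c (pvRankOf cs c)) PySem.Dict.empty
  cs.map (fun c => rank.getD c 0)

-- ===== PRECONDITION & SPEC =====
def Spec_computePattern (word : String) (out : List Int) : Prop := out = computePattern_alt word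
instance (word : String) (out : List Int) : Decidable (Spec_computePattern word out) := by unfold Spec_computePattern; infer_instance

-- ===== CLAIM (what is proved, stated in full; the proofs are below) =====
def Claim_equal_computePattern : Prop := ∀ (word : String), Dom_computePattern word → Spec_computePattern word (computePattern word)

-- ===== LEMMAS AND PROOFS =====

-- A's build loop, started from d instead of empty
def pvBuildFrom (cs : List Char) (d : PySem.Dict Char Int) : PySem.Dict Char Int :=
  cs.foldl (fun d c => if d.contains c then d else d.insert c (d.size : Int)) d

-- A's build loop never changes an existing binding
theorem pvBuild_preserves (cs : List Char) (d : PySem.Dict Char Int) (c : Char) (v : Int)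
    (h : d.get? c = some v) : (pvBuildFrom cs d).get? c = some v := by
  induction cs generalizing d with
  | nil => exact h
  | cons c' cs ih =>
    simp only [pvBuildFrom, List.foldl_cons]
    by_cases hc : d.contains c' = true
    · simp [hc]; exact ih d h
    · simp only [hc, Bool.false_eq_true, if_false]
      apply ih
      have hne : c ≠ c' := by
        intro e; subst e
        rw [PySem.Dict.contains_eq_isSome_get?, h] at hc; simp at hc
      rw [PySem.Dict.get?_insert_of_ne _ _ hne]
      exact h

-- invariant: A's loop from state (|d|, d, acc) produces acc ++ the map through the finished dict
theorem pvMainA (cs : List Char) (d : PySem.Dict Char Int) (acc : List Int)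
    (hnd : d.keys.Nodup) :
    (cs.foldl pvStepA ((d.size : Int), d, acc)).2.2
    = acc ++ cs.map (fun c => (pvBuildFrom cs d).getD c 0) := by
  induction cs generalizing d acc with
  | nil => simp [pvBuildFrom]
  | cons c cs ih =>
    simp only [List.foldl_cons, List.map_cons]
    by_cases hc : d.contains c = true
    · obtain ⟨v, hv⟩ := Option.isSome_iff_exists.mp
        (by rw [← PySem.Dict.contains_eq_isSome_get? d c]; exact hc)
      have hstep : pvStepA ((d.size : Int), d, acc) c
          = ((d.size : Int), d, acc ++ [d.getD c 0]) := by
        simp [pvStepA, hc]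
      have hbuild : pvBuildFrom (c :: cs) d = pvBuildFrom cs d := by
        simp [pvBuildFrom, hc]
      have hhead : (pvBuildFrom (c :: cs) d).getD c 0 = d.getD c 0 := by
        rw [hbuild, PySem.Dict.getD_of_get?_eq_some _ _ (pvBuild_preserves cs d c v hv),
            PySem.Dict.getD_of_get?_eq_some _ _ hv]
      rw [hstep, ih d (acc ++ [d.getD c 0]) hnd, hhead, hbuild]
      simp
    · have hc' : d.contains c = false := by simpa using hc
      have hsome : (d.insert c (d.size : Int)).get? c = some (d.size : Int) :=
        PySem.Dict.get?_insert_self _ _ _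
      have hval : (d.insert c (d.size : Int)).getD c 0 = (d.size : Int) :=
        PySem.Dict.getD_of_get?_eq_some _ _ hsome
      have hstep : pvStepA ((d.size : Int), d, acc) c
          = ((d.size : Int) + 1, d.insert c (d.size : Int), acc ++ [(d.size : Int)]) := by
        simp [pvStepA, hc', hval]
      have hbuild : pvBuildFrom (c :: cs) d = pvBuildFrom cs (d.insert c (d.size : Int)) := by
        simp [pvBuildFrom, hc']
      have hhead : (pvBuildFrom (c :: cs) d).getD c 0 = (d.size : Int) := by
        rw [hbuild, PySem.Dict.getD_of_get?_eq_some _ _ (pvBuild_preserves cs _ c _ hsome)]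
      have hsize : ((d.insert c (d.size : Int)).size : Int) = (d.size : Int) + 1 := by
        rw [PySem.Dict.size_insert]
        simp [hc']
      have hnd' : (d.insert c (d.size : Int)).keys.Nodup :=
        PySem.Dict.nodup_keys_insert _ _ _ hnd
      have hrec := ih (d.insert c (d.size : Int)) (acc ++ [(d.size : Int)]) hnd'
      rw [hsize] at hrec
      rw [hstep, hrec, hhead, hbuild]
      simp

-- invariant for A's dict-build: membership and size track the set of characters processed
theorem pvBuild_inv (pre : List Char) (d : PySem.Dict Char Int) (S : PySem.Set Char)
    (hmem : ∀ x, d.contains x = true ↔ x ∈ S) (hsz : d.size = S.length) :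
    (∀ x, (pvBuildFrom pre d).contains x = true ↔ x ∈ PySem.Set.update S pre) ∧
    (pvBuildFrom pre d).size = (PySem.Set.update S pre).length := by
  induction pre generalizing d S with
  | nil => exact ⟨hmem, hsz⟩
  | cons y pre ih =>
    simp only [pvBuildFrom, List.foldl_cons, PySem.Set.update_cons]
    by_cases hy : d.contains y = true
    · have hyS : y ∈ S := (hmem y).mp hy
      rw [PySem.Set.add_of_mem hyS]
      simpa [pvBuildFrom, hy] using ih d S hmem hsz
    · have hy' : d.contains y = false := by simpa using hy
      have hyS : y ∉ S := fun h => hy ((hmem y).mpr h)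
      rw [PySem.Set.add_of_not_mem hyS]
      simp only [hy', Bool.false_eq_true, if_false]
      apply ih
      · intro x
        rw [PySem.Dict.contains_insert]
        constructor
        · intro h
          rcases Bool.or_eq_true_iff.mp h with h | h
          · simp only [beq_iff_eq] at h; subst h; simp
          · exact List.mem_append_left _ ((hmem x).mp h)
        · intro h
          rcases List.mem_append.mp h with h | h
          · exact Bool.or_eq_true_iff.mpr (Or.inr ((hmem x).mpr h))
          · simp only [List.mem_singleton] at h; subst h; simp
      · rw [PySem.Dict.size_insert, hy']
        simp [hsz]

-- a fold inserting keys c is not among leaves get? c unchanged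
theorem pvGet?_foldl_insert_not_mem (L : List Char) (f : Char → Int)
    (d : PySem.Dict Char Int) (c : Char) (hc : c ∉ L) :
    (L.foldl (fun d x => d.insert x (f x)) d).get? c = d.get? c := by
  induction L generalizing d with
  | nil => rfl
  | cons x L ih =>
    simp only [List.foldl_cons]
    rw [ih _ (fun h => hc (List.mem_cons_of_mem _ h)),
        PySem.Dict.get?_insert_of_ne _ _ (by rintro rfl; exact hc List.mem_cons_self)]

-- B's dict comprehension over distinct keys looks up to exactly the comprehension's value
theorem pvGetD_foldl_insert_fn (L : List Char) (f : Char → Int)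
    (d : PySem.Dict Char Int) (c : Char) (hc : c ∈ L) (hnd : L.Nodup) :
    (L.foldl (fun d x => d.insert x (f x)) d).getD c 0 = f c := by
  induction L generalizing d with
  | nil => cases hc
  | cons x L ih =>
    simp only [List.foldl_cons]
    rcases List.mem_cons.mp hc with rfl | hc'
    · have hnot : c ∉ L := (List.nodup_cons.mp hnd).1
      rw [PySem.Dict.getD_eq_get?_getD, pvGet?_foldl_insert_not_mem L f _ c hnot,
          PySem.Dict.get?_insert_self]
      rfl
    · exact ih _ hc' (List.nodup_cons.mp hnd).2

-- the core fact: A's first-sight counter value for c equals B's closed-form rank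
theorem pvRank_eq (cs : List Char) (c : Char) (hc : c ∈ cs) :
    (pvBuildFrom cs PySem.Dict.empty).getD c 0 = pvRankOf cs c := by
  obtain ⟨n, hn⟩ := Option.isSome_iff_exists.mp
    ((PySem.List.index?_isSome_iff cs c).mpr hc)
  obtain ⟨pre, suf, hcs, hlen, hpre⟩ := (PySem.List.index?_eq_some_iff cs c n).mp hn
  have htake : cs.take n = pre := by
    rw [hcs, ← hlen, List.take_left]
  have hrank : pvRankOf cs c = ((PySem.Set.ofList pre).length : Int) := by
    unfold pvRankOf
    rw [hn, Option.getD_some, htake]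
  -- evaluate A's build on pre ++ c :: suf
  have hsplit : pvBuildFrom cs PySem.Dict.empty
      = pvBuildFrom suf (pvBuildFrom (pre ++ [c]) PySem.Dict.empty) := by
    rw [hcs]
    show pvBuildFrom (pre ++ c :: suf) _ = _
    rw [show pre ++ c :: suf = (pre ++ [c]) ++ suf by simp]
    simp [pvBuildFrom, List.foldl_append]
  have hinv := pvBuild_inv pre PySem.Dict.empty PySem.Set.empty
    (by intro x; simp [PySem.Dict.contains_empty, PySem.Set.empty])
    (by simp [PySem.Dict.size_empty, PySem.Set.empty])
  rw [show (PySem.Set.empty : PySem.Set Char).update pre = PySem.Set.ofList pre from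
      PySem.Set.update_nil_left pre] at hinv
  set dp := pvBuildFrom pre PySem.Dict.empty with hdp
  have hcnot : dp.contains c = false := by
    rcases h : dp.contains c with _ | _
    · rfl
    · exact absurd ((PySem.Set.mem_ofList _ _).mp ((hinv.1 c).mp h)) hpre
  have hstep : pvBuildFrom (pre ++ [c]) PySem.Dict.empty
      = dp.insert c (dp.size : Int) := by
    rw [show pvBuildFrom (pre ++ [c]) PySem.Dict.empty
        = pvBuildFrom [c] dp from by simp [pvBuildFrom, List.foldl_append, hdp]]
    simp [pvBuildFrom, hcnot]
  rw [hsplit, hstep,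
      PySem.Dict.getD_of_get?_eq_some _ _
        (pvBuild_preserves suf _ c _ (PySem.Dict.get?_insert_self _ _ _)),
      hinv.2, hrank]

-- ===== VERDICT (by name: the statement is the Claim_ definition above) =====
theorem computePattern_spec : Claim_equal_computePattern := by
  intro word _
  unfold Spec_computePattern computePattern computePattern_alt
  have hA := pvMainA word.toList PySem.Dict.empty [] PySem.Dict.nodup_keys_empty
  simp only [PySem.Dict.size_empty, Nat.cast_zero, List.nil_append] at hA
  rw [hA]
  apply List.map_congr_left
  intro c hc
  rw [pvRank_eq word.toList c hc,
      pvGetD_foldl_insert_fn (PySem.Set.ofList word.toList) (pvRankOf word.toList)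
        PySem.Dict.empty c ((PySem.Set.mem_ofList _ _).mpr hc) (PySem.Set.nodup_ofList _)]
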